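-- pv_equiv track=rewrite | github.com/BrandonJRobinson/modular-forms-ml | hauptmodul.py | check_ligozat_condition
-- ===== SOURCE A (Python) =====
-- def get_factors(n):
--     return [i for i in range(1, n + 1) if n % i == 0]
--
-- def check_ligozat_condition(N, r_dict):
--     """
--     Checks if the eta quotient prod eta(d*tau)^r_d is a modular function on Gamma0(N).
--     conditions:
--     1. sum r_d = 0
--     2. sum d * r_d = 0 mod 24
--     3. sum (N/d) * r_d = 0 mod 24
--     4. Product extends to squares?
--        Actually, just need (prod d^r_d) is square of rational?
--        Usually this is for character triviality.
--        Assuming trivial character if sum r_d is even?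
--        Let's stick to the 3 linear conditions for weight 0 and level N.
--     """
--     r_list = [r_dict.get(d, 0) for d in get_factors(N)]
--
--     # 1. Weight 0
--     if sum(r_list) != 0:
--         return False
--
--     # 2. Level condition 1
--     sum2 = sum(d * r_dict.get(d, 0) for d in get_factors(N))
--     if sum2 % 24 != 0:
--         return False
--
--     # 3. Level condition 2
--     sum3 = sum((N // d) * r_dict.get(d, 0) for d in get_factors(N))
--     if sum3 % 24 != 0:
--         return False
--
--     return True
-- ===== SOURCE B (Python) =====
-- def check_ligozat_condition(N, r_dict):
--     # Single pass over divisors d with d*d <= N, pairing d with N//d,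
--     # accumulating all three Ligozat sums at once.
--     s1 = s2 = s3 = 0
--     d = 1
--     while d * d <= N:
--         if N % d == 0:
--             r = r_dict.get(d, 0)
--             e = N // d
--             s1 += r
--             s2 += d * r
--             s3 += e * r
--             if e != d:
--                 re = r_dict.get(e, 0)
--                 s1 += re
--                 s2 += e * re
--                 s3 += d * re
--         d += 1
--     return s1 == 0 and s2 % 24 == 0 and s3 % 24 == 0
-- ===== Notes on version B (the rewrite author's own statement) =====
-- stated objective: alternative
-- what changed: Replaces three full scans over range(1, N+1) (each rebuilding the divisor list) by one loop over d with d*d <= N that visits each divisor pair (d, N//d) once and accumulates all three Ligozat sums simultaneously.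
import Mathlib
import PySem

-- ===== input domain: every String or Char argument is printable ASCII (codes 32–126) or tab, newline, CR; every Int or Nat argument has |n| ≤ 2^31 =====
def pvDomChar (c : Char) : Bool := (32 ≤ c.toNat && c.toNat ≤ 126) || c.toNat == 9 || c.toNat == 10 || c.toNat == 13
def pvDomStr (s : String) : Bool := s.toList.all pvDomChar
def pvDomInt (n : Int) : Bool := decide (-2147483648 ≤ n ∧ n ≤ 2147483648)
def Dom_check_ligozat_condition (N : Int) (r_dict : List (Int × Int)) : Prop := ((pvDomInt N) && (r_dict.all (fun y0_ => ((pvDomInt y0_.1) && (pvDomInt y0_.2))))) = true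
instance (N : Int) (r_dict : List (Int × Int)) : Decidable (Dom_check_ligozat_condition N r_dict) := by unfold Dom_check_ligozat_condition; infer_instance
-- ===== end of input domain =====

-- B replaces A's three scans over range(1, N+1) by one pass over divisor pairs (d, N//d) with d*d <= N, accumulating all three sums at once.

-- ===== PORT A =====
def get_factors (n : Int) : List Int :=
  (PySem.List.pyRange 1 (n + 1) 1).filter (fun i => PySem.Int.mod n i == 0)

def check_ligozat_condition (N : Int) (r_dict : List (Int × Int)) : Bool :=
  let r := PySem.Dict.mk r_dict
  let r_list := (get_factors N).map (fun d => r.getD d 0)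
  if r_list.sum ≠ 0 then false
  else
    let sum2 := ((get_factors N).map (fun d => d * r.getD d 0)).sum
    if PySem.Int.mod sum2 24 ≠ 0 then false
    else
      let sum3 := ((get_factors N).map (fun d => (PySem.Int.floordiv N d) * r.getD d 0)).sum
      if PySem.Int.mod sum3 24 ≠ 0 then false
      else true

-- ===== PORT B =====
-- termination helper for the while loop: d*d ≤ N forces d ≤ N (cited in decreasing_by)
theorem pv_sq_le_imp_le {d N : Int} (h : d * d ≤ N) : d ≤ N := by
  by_cases h0 : d ≤ 0
  · nlinarith [mul_self_nonneg d]
  · nlinarith [show 1 ≤ d by omega]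

def ligozatLoop (r : PySem.Dict Int Int) (N : Int) (d : Int) (s1 s2 s3 : Int) :
    Int × Int × Int :=
  if h : d * d ≤ N then
    if PySem.Int.mod N d == 0 then
      let rv := r.getD d 0
      let e := PySem.Int.floordiv N d
      let s1' := s1 + rv
      let s2' := s2 + d * rv
      let s3' := s3 + e * rv
      if e ≠ d then
        ligozatLoop r N (d + 1) (s1' + r.getD e 0) (s2' + e * r.getD e 0) (s3' + d * r.getD e 0)
      else
        ligozatLoop r N (d + 1) s1' s2' s3'
    else ligozatLoop r N (d + 1) s1 s2 s3
  else (s1, s2, s3)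
termination_by (N + 1 - d).toNat
decreasing_by all_goals (have hd := pv_sq_le_imp_le h; omega)

def check_ligozat_condition_alt (N : Int) (r_dict : List (Int × Int)) : Bool :=
  let r := PySem.Dict.mk r_dict
  let t := ligozatLoop r N 1 0 0 0
  t.1 == 0 && PySem.Int.mod t.2.1 24 == 0 && PySem.Int.mod t.2.2 24 == 0

-- ===== PRECONDITION & SPEC =====
def Spec_check_ligozat_condition (N : Int) (r_dict : List (Int × Int)) (out : Bool) : Prop := out = check_ligozat_condition_alt N r_dict
instance (N : Int) (r_dict : List (Int × Int)) (out : Bool) : Decidable (Spec_check_ligozat_condition N r_dict out) := by unfold Spec_check_ligozat_condition; infer_instance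

-- ===== CLAIM (what is proved, stated in full; the proofs are below) =====
def Claim_equal_check_ligozat_condition : Prop := ∀ (N : Int) (r_dict : List (Int × Int)), Dom_check_ligozat_condition N r_dict → Spec_check_ligozat_condition N r_dict (check_ligozat_condition N r_dict)

-- ===== LEMMAS AND PROOFS =====

-- the set of positive divisors of N
def Dv (N : Int) : Finset ℤ :=
  ((PySem.List.pyRange 1 (N + 1) 1).filter (fun x => N % x == 0)).toFinset

-- the smaller member of the divisor pair {x, N/x}
def mfn (N x : Int) : Int := min x (N / x)

-- sum of g over the divisors whose pair-minimum is ≥ d (what the loop still has to add from d on)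
def SF (N : Int) (g : Int → Int) (d : Int) : Int :=
  ∑ x ∈ (Dv N).filter (fun x => d ≤ mfn N x), g x

theorem mem_Dv {N x : Int} : x ∈ Dv N ↔ 1 ≤ x ∧ x ≤ N ∧ N % x = 0 := by
  simp [Dv, PySem.List.mem_pyRange_one, and_assoc]

theorem sumA (N : Int) (g : Int → Int) :
    ((get_factors N).map g).sum = ∑ x ∈ Dv N, g x := by
  have hnd : ((PySem.List.pyRange 1 (N + 1) 1).filter (fun x => N % x == 0)).Nodup :=
    (PySem.List.nodup_pyRange_one 1 (N + 1)).filter _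
  rw [Dv, List.sum_toFinset _ hnd]
  have : get_factors N = (PySem.List.pyRange 1 (N + 1) 1).filter (fun x => N % x == 0) := by
    unfold get_factors
    apply List.filter_congr
    intro x hx
    rw [PySem.List.mem_pyRange_one] at hx
    rw [PySem.Int.mod_eq_emod_of_pos (show (0:Int) < x by omega)]
  rw [this]

theorem Dv_facts {N x : Int} (hx : x ∈ Dv N) :
    1 ≤ x ∧ x ≤ N ∧ x ∣ N ∧ 1 ≤ N / x ∧ (N / x) * x = N ∧ (N / x) ∣ N := by
  rw [mem_Dv] at hx
  obtain ⟨h1, h2, h3⟩ := hx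
  have hdvd : x ∣ N := Int.dvd_of_emod_eq_zero h3
  have hmul : (N / x) * x = N := Int.ediv_mul_cancel hdvd
  have hq : 1 ≤ N / x := by nlinarith
  exact ⟨h1, h2, hdvd, hq, hmul, ⟨x, hmul.symm⟩⟩

theorem SF_empty {N d : Int} (hd : 1 ≤ d) (h : ¬ d * d ≤ N) (g : Int → Int) :
    SF N g d = 0 := by
  unfold SF
  rw [Finset.filter_false_of_mem, Finset.sum_empty]
  intro x hx
  obtain ⟨h1, _, _, hq, hmul, _⟩ := Dv_facts hx
  simp only [mfn, not_le]
  rcases le_total x (N / x) with hc | hc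
  · rw [min_eq_left hc]; nlinarith
  · rw [min_eq_right hc]; nlinarith

theorem SF_skip {N d : Int} (hnd : ¬ d ∣ N) (g : Int → Int) :
    SF N g d = SF N g (d + 1) := by
  unfold SF
  congr 1
  apply Finset.filter_congr
  intro x hx
  obtain ⟨h1, h2, hdvd, hq, hmul, hqdvd⟩ := Dv_facts hx
  have hne : mfn N x ≠ d := by
    intro he
    rcases le_total x (N / x) with hc | hc
    · rw [mfn, min_eq_left hc] at he; exact hnd (he ▸ hdvd)
    · rw [mfn, min_eq_right hc] at he; exact hnd (he ▸ hqdvd)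
  omega

theorem SF_step (N d : Int) (g : Int → Int) :
    SF N g d = (∑ x ∈ (Dv N).filter (fun x => mfn N x = d), g x) + SF N g (d + 1) := by
  unfold SF
  have hsplit : (Dv N).filter (fun x => d ≤ mfn N x) =
      (Dv N).filter (fun x => mfn N x = d) ∪ (Dv N).filter (fun x => d + 1 ≤ mfn N x) := by
    rw [← Finset.filter_or]
    apply Finset.filter_congr
    intro x _
    omega
  rw [hsplit, Finset.sum_union]
  rw [Finset.disjoint_left]
  intro x hx hx'
  simp only [Finset.mem_filter] at hx hx'
  omega

theorem filter_eq_pair {N d : Int} (hd : 1 ≤ d) (hsq : d * d ≤ N) (hdvd : d ∣ N) :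
    (Dv N).filter (fun x => mfn N x = d) =
      if N / d = d then {d} else {d, N / d} := by
  have hmul : (N / d) * d = N := Int.ediv_mul_cancel hdvd
  have hde : d ≤ N / d := by nlinarith
  have hN1 : 1 ≤ N := by nlinarith
  have hdN : d ∈ Dv N := mem_Dv.mpr ⟨hd, by nlinarith, Int.emod_eq_zero_of_dvd hdvd⟩
  have heN : N / d ∈ Dv N := by
    refine mem_Dv.mpr ⟨by omega, by nlinarith, Int.emod_eq_zero_of_dvd ⟨d, hmul.symm⟩⟩
  have hNe : N / (N / d) = d := by
    have : (N / d) * d / (N / d) = d := Int.mul_ediv_cancel_left d (by omega)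
    rwa [hmul] at this
  have hmfnd : mfn N d = d := by rw [mfn, min_eq_left hde]
  have hmfne : mfn N (N / d) = d := by rw [mfn, hNe, min_eq_right hde]
  apply Finset.ext
  intro x
  simp only [Finset.mem_filter]
  constructor
  · rintro ⟨hx, hm⟩
    obtain ⟨h1, h2, hxdvd, hq, hxmul, _⟩ := Dv_facts hx
    rcases le_total x (N / x) with hc | hc
    · rw [mfn, min_eq_left hc] at hm
      split <;> simp [hm]
    · rw [mfn, min_eq_right hc] at hm
      have hx_eq : x = N / d := by
        have hxd : x * d = N := by rw [← hm, mul_comm]; exact hxmul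
        have : x * d = (N / d) * d := by rw [hxd]; exact hmul.symm
        exact mul_right_cancel₀ (by omega) this
      split
      · rename_i he; simp [hx_eq, he]
      · simp [hx_eq]
  · intro hx
    split at hx
    · rename_i he
      simp only [Finset.mem_singleton] at hx
      subst hx
      exact ⟨hdN, hmfnd⟩
    · simp only [Finset.mem_insert, Finset.mem_singleton] at hx
      rcases hx with rfl | rfl
      · exact ⟨hdN, hmfnd⟩
      · exact ⟨heN, hmfne⟩

theorem SF_one (N : Int) (g : Int → Int) : SF N g 1 = ∑ x ∈ Dv N, g x := by
  unfold SF
  rw [Finset.filter_true_of_mem]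
  intro x hx
  obtain ⟨h1, _, _, hq, _, _⟩ := Dv_facts hx
  rw [mfn]
  omega

theorem loop_eq (r : PySem.Dict Int Int) (N : Int) :
    ∀ (n : Nat) (d s1 s2 s3 : Int), (N + 1 - d).toNat = n → 1 ≤ d →
      ligozatLoop r N d s1 s2 s3 =
        (s1 + SF N (fun x => r.getD x 0) d,
         s2 + SF N (fun x => x * r.getD x 0) d,
         s3 + SF N (fun x => (N / x) * r.getD x 0) d) := by
  intro n
  induction n with
  | zero =>
    intro d s1 s2 s3 hn hd
    have hg : ¬ d * d ≤ N := by nlinarith [show N + 1 - d ≤ 0 by omega]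
    rw [ligozatLoop, dif_neg hg]
    rw [SF_empty hd hg, SF_empty hd hg, SF_empty hd hg]
    simp
  | succ k ih =>
    intro d s1 s2 s3 hn hd
    rw [ligozatLoop]
    by_cases hg : d * d ≤ N
    · rw [dif_pos hg]
      have hrec : (N + 1 - (d + 1)).toNat = k := by
        have := pv_sq_le_imp_le hg; omega
      by_cases hdvd : d ∣ N
      · have hmodz : (PySem.Int.mod N d == 0) = true := by
          simp [PySem.Int.mod_eq_zero_iff_dvd, hdvd]
        rw [hmodz]
        simp only [if_true]
        have hfd : PySem.Int.floordiv N d = N / d := PySem.Int.floordiv_eq_ediv_of_pos (show (0:Int) < d by omega)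
        have hmul : (N / d) * d = N := Int.ediv_mul_cancel hdvd
        have hde : d ≤ N / d := by nlinarith
        have hNe : N / (N / d) = d := by
          have : (N / d) * d / (N / d) = d := Int.mul_ediv_cancel_left d (by omega)
          rwa [hmul] at this
        have hpair := filter_eq_pair (N := N) hd hg hdvd
        by_cases he : N / d = d
        · rw [if_pos he] at hpair
          have hne : ¬ (PySem.Int.floordiv N d ≠ d) := by rw [hfd]; simp [he]
          rw [if_neg hne]
          rw [ih (d + 1) _ _ _ hrec (by omega)]
          rw [SF_step N d, SF_step N d (fun x => x * r.getD x 0),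
              SF_step N d (fun x => (N / x) * r.getD x 0), hpair]
          simp only [Finset.sum_singleton, hfd, he]
          refine Prod.ext ?_ (Prod.ext ?_ ?_) <;> simp <;> ring
        · rw [if_neg he] at hpair
          have hne : (PySem.Int.floordiv N d ≠ d) := by rw [hfd]; exact he
          rw [if_pos hne]
          rw [ih (d + 1) _ _ _ hrec (by omega)]
          rw [SF_step N d, SF_step N d (fun x => x * r.getD x 0),
              SF_step N d (fun x => (N / x) * r.getD x 0), hpair]
          have hdne : d ≠ N / d := fun h => he h.symm
          rw [Finset.sum_pair hdne, Finset.sum_pair hdne, Finset.sum_pair hdne]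
          simp only [hfd, hNe]
          refine Prod.ext ?_ (Prod.ext ?_ ?_) <;> simp <;> ring
      · have hmodz : (PySem.Int.mod N d == 0) = false := by
          simp [PySem.Int.mod_eq_zero_iff_dvd, hdvd]
        rw [hmodz]
        simp only [if_false, Bool.false_eq_true]
        rw [ih (d + 1) _ _ _ hrec (by omega)]
        rw [SF_skip hdvd, SF_skip hdvd, SF_skip hdvd]
    · rw [dif_neg hg]
      rw [SF_empty hd hg, SF_empty hd hg, SF_empty hd hg]
      simp

theorem pv_main (N : Int) (r_dict : List (Int × Int)) :
    check_ligozat_condition N r_dict = check_ligozat_condition_alt N r_dict := by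
  simp only [check_ligozat_condition, check_ligozat_condition_alt]
  rw [loop_eq (PySem.Dict.mk r_dict) N (N + 1 - 1).toNat 1 0 0 0 rfl le_rfl]
  rw [SF_one, SF_one, SF_one]
  rw [sumA, sumA, sumA]
  have h3 : (∑ x ∈ Dv N, PySem.Int.floordiv N x * (PySem.Dict.mk r_dict).getD x 0) =
      ∑ x ∈ Dv N, (N / x) * (PySem.Dict.mk r_dict).getD x 0 := by
    apply Finset.sum_congr rfl
    intro x hx
    obtain ⟨h1, _⟩ := Dv_facts hx
    rw [PySem.Int.floordiv_eq_ediv_of_pos (show (0:Int) < x by omega)]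
  rw [h3]
  simp only [zero_add]
  split_ifs <;> simp_all

-- ===== VERDICT (by name: the statement is the Claim_ definition above) =====
theorem check_ligozat_condition_spec : Claim_equal_check_ligozat_condition := by
  intro N r_dict _
  unfold Spec_check_ligozat_condition
  exact pv_main N r_dict
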